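-- pv_equiv track=rewrite | github.com/unbeatable2718/bachelor_code | plot_s_vs_ct.py | generate_full_year_month_range
-- ===== SOURCE A (Python) =====
-- def generate_full_year_month_range(start_year, start_month, end_year, end_month):
--     months = []
--     current_year, current_month = start_year, start_month
--
--     while (current_year, current_month) <= (end_year, end_month):
--         months.append(f"{current_year}-{current_month:02d}")
--         if current_month == 12:
--             current_year += 1
--             current_month = 1
--         else:
--             current_month += 1
--
--     return months
-- ===== SOURCE B (Python) =====
-- def generate_full_year_month_range(start_year, start_month, end_year, end_month):
--     start_idx = start_year * 12 + (start_month - 1)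
--     end_idx = end_year * 12 + (end_month - 1)
--     months = []
--     for idx in range(start_idx, end_idx + 1):
--         year, month0 = divmod(idx, 12)
--         months.append(f"{year}-{month0 + 1:02d}")
--     return months
-- ===== Notes on version B (the rewrite author's own statement) =====
-- stated objective: alternative
-- what changed: Replaces the stateful (year,month) carry-over while-loop with a single arithmetic index range: absolute month indices year*12+(month-1) drive a plain for-loop and divmod(idx,12) recovers each year-month.
-- outside the precondition, e.g. on generate_full_year_month_range(0, 12, 0, 13): A returns ['0-12'], B returns ['0-12', '1-01']; on generate_full_year_month_range(0, 0, 0, 0): A returns ['0-00'], B returns ['-1-12']; on generate_full_year_month_range(1, -14, 0, 1): A returns [], B returns ['-1-10', '-1-11', '-1-12', '0-01']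
import Mathlib
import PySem

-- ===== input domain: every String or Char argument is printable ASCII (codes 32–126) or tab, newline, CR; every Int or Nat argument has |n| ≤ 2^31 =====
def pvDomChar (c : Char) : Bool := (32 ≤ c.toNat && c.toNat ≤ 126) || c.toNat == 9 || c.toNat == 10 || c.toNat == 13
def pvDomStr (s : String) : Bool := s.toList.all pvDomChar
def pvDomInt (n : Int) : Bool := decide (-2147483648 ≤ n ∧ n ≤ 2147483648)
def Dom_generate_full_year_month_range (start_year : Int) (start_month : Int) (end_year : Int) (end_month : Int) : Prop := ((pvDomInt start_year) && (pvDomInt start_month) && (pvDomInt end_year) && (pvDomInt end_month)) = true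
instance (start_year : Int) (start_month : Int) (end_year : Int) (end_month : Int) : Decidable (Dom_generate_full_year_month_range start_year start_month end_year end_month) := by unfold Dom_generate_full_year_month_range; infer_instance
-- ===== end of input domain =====

-- B replaces A's carry-over (year,month) while-loop by a plain arithmetic index range with divmod; alternative decomposition, same cost.


-- ===== PORT A =====
-- f"{n:02d}": zero-pad the decimal form of n to width 2 (exact for width 2: a negative n of one digit is already two characters wide)
def pvFmt02 (n : Int) : String :=
  let s := PySem.Int.toStr n
  if PySem.Str.len s < 2 then "0" ++ s else s

-- A's while-loop, as structural recursion on a fuel that bounds the number of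
-- iterations (a pure totality guard: inside Pre_ the caller passes enough fuel
-- for the loop to run to its Python termination point, so behaviour is exact;
-- outside Pre_ the Python loop can diverge). The branch condition is Python's
-- tuple comparison (cy, cm) <= (ey, em).
def pvLoopA (ey em : Int) : Nat → Int → Int → List String → List String
  | 0, _, _, acc => acc
  | fuel + 1, cy, cm, acc =>
    if cy < ey ∨ (cy = ey ∧ cm ≤ em) then
      let entry := PySem.Int.toStr cy ++ "-" ++ pvFmt02 cm
      if cm = 12 then pvLoopA ey em fuel (cy + 1) 1 (acc ++ [entry])
      else pvLoopA ey em fuel cy (cm + 1) (acc ++ [entry])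
    else acc

def generate_full_year_month_range (start_year : Int) (start_month : Int) (end_year : Int) (end_month : Int) : List String :=
  pvLoopA end_year end_month
    ((12 * end_year + end_month + 1 - (12 * start_year + start_month)).toNat
      + (12 * end_year + 13 - (12 * start_year + start_month)).toNat)
    start_year start_month []

-- ===== PORT B =====
def pvFmtIdx (idx : Int) : String :=
  PySem.Int.toStr (PySem.Int.floordiv idx 12) ++ "-" ++ pvFmt02 (PySem.Int.mod idx 12 + 1)

def generate_full_year_month_range_alt (start_year : Int) (start_month : Int) (end_year : Int) (end_month : Int) : List String :=
  let start_idx := start_year * 12 + (start_month - 1)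
  let end_idx := end_year * 12 + (end_month - 1)
  (PySem.List.pyRange start_idx (end_idx + 1) 1).foldl (fun acc idx => acc ++ [pvFmtIdx idx]) []

-- ===== PRECONDITION & SPEC =====
-- Pre_ admits calendar months 1..12 (and the immediately-empty ranges on which both
-- programs return []); on other out-of-range months A either diverges (start_month > 12
-- with start_year < end_year) or its wrap-only-at-12 carry yields values B's normalizing
-- divmod defensibly does not match.
def Pre_generate_full_year_month_range (start_year : Int) (start_month : Int) (end_year : Int) (end_month : Int) : Prop :=
  (1 ≤ start_month ∧ start_month ≤ 12 ∧ 1 ≤ end_month ∧ end_month ≤ 12) ∨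
  ((end_year < start_year ∨ (end_year = start_year ∧ end_month < start_month)) ∧
    12 * end_year + end_month < 12 * start_year + start_month)
instance (start_year : Int) (start_month : Int) (end_year : Int) (end_month : Int) : Decidable (Pre_generate_full_year_month_range start_year start_month end_year end_month) := by unfold Pre_generate_full_year_month_range; infer_instance

def pvWitness_generate_full_year_month_range : Int × Int × Int × Int := (2020, 11, 2021, 2)

def Spec_generate_full_year_month_range (start_year : Int) (start_month : Int) (end_year : Int) (end_month : Int) (out : List String) : Prop := out = generate_full_year_month_range_alt start_year start_month end_year end_month
instance (start_year : Int) (start_month : Int) (end_year : Int) (end_month : Int) (out : List String) : Decidable (Spec_generate_full_year_month_range start_year start_month end_year end_month out) := by unfold Spec_generate_full_year_month_range; infer_instance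

-- ===== CLAIM (what is proved, stated in full; the proofs are below) =====
def Claim_equal_generate_full_year_month_range : Prop := ∀ (start_year : Int) (start_month : Int) (end_year : Int) (end_month : Int), Dom_generate_full_year_month_range start_year start_month end_year end_month → Pre_generate_full_year_month_range start_year start_month end_year end_month → Spec_generate_full_year_month_range start_year start_month end_year end_month (generate_full_year_month_range start_year start_month end_year end_month)

-- ===== LEMMAS AND PROOFS =====

-- B's per-index formatter agrees with A's entry at the index of a valid (cy, cm).
lemma pvFmtIdx_eq (cy cm : Int) (h1 : 1 ≤ cm) (h2 : cm ≤ 12) :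
    pvFmtIdx (12 * cy + cm - 1) = PySem.Int.toStr cy ++ "-" ++ pvFmt02 cm := by
  have hdiv : PySem.Int.floordiv (12 * cy + cm - 1) 12 = cy := by
    rw [PySem.Int.floordiv_eq_iff_of_pos (by omega)]
    constructor <;> nlinarith
  have hmod : PySem.Int.mod (12 * cy + cm - 1) 12 = cm - 1 := by
    have := PySem.Int.floordiv_mul_add_mod (12 * cy + cm - 1) 12
    rw [hdiv] at this; omega
  unfold pvFmtIdx
  rw [hdiv, hmod]
  norm_num

lemma foldl_append_singleton (f : Int → String) :
    ∀ (l : List Int) (acc : List String),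
      l.foldl (fun a i => a ++ [f i]) acc = acc ++ l.map f := by
  intro l
  induction l with
  | nil => simp
  | cons x xs ih => intro acc; simp [List.foldl, ih]

lemma pvLoopA_eq (ey em : Int) (hem1 : 1 ≤ em) (hem2 : em ≤ 12) :
    ∀ (n : Nat) (cy cm : Int) (acc : List String), 1 ≤ cm → cm ≤ 12 →
      (12 * ey + em + 1 - (12 * cy + cm)).toNat ≤ n →
      pvLoopA ey em n cy cm acc =
        acc ++ (PySem.List.pyRange (12 * cy + cm - 1) (12 * ey + em) 1).map pvFmtIdx := by
  intro n
  induction n with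
  | zero =>
    intro cy cm acc hc1 hc2 hn
    rw [pvLoopA, PySem.List.pyRange_one_eq_nil (by omega)]
    simp
  | succ n ih =>
    intro cy cm acc hc1 hc2 hn
    rw [pvLoopA]
    by_cases hg : cy < ey ∨ (cy = ey ∧ cm ≤ em)
    · rw [if_pos hg]
      have hidx : 12 * cy + cm ≤ 12 * ey + em := by
        rcases hg with h | ⟨h, h'⟩ <;> omega
      have hlt : 12 * cy + cm - 1 < 12 * ey + em := by omega
      rw [PySem.List.pyRange_one_cons hlt, List.map_cons, pvFmtIdx_eq cy cm hc1 hc2]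
      by_cases h12 : cm = 12
      · rw [if_pos h12]
        rw [ih (cy + 1) 1 _ (by omega) (by omega) (by omega)]
        subst h12
        have h13 : 12 * (cy + 1) + 1 - 1 = 12 * cy + 12 - 1 + 1 := by ring
        rw [h13]
        simp
      · rw [if_neg h12]
        rw [ih cy (cm + 1) _ (by omega) (by omega) (by omega)]
        have h1 : 12 * cy + (cm + 1) - 1 = 12 * cy + cm - 1 + 1 := by ring
        rw [h1]
        simp
    · rw [if_neg hg]
      have hge : 12 * ey + em ≤ 12 * cy + cm - 1 := by
        by_cases hcy : cy < ey
        · exact absurd (Or.inl hcy) hg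
        · by_cases he : cy = ey
          · have : ¬ cm ≤ em := fun hle => hg (Or.inr ⟨he, hle⟩)
            omega
          · omega
      rw [PySem.List.pyRange_one_eq_nil hge]
      simp

-- ===== VERDICT (by name: the statement is the Claim_ definition above) =====
theorem generate_full_year_month_range_spec : Claim_equal_generate_full_year_month_range := by
  intro sy sm ey em _ hpre
  unfold Spec_generate_full_year_month_range generate_full_year_month_range
    generate_full_year_month_range_alt
  rcases hpre with ⟨h1, h2, h3, h4⟩ | ⟨htup, hidx⟩
  · rw [pvLoopA_eq ey em h3 h4 _ sy sm [] h1 h2 (by omega)]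
    rw [foldl_append_singleton]
    have ha : sy * 12 + (sm - 1) = 12 * sy + sm - 1 := by ring
    have hb : ey * 12 + (em - 1) + 1 = 12 * ey + em := by ring
    rw [ha, hb]
  · have hg : ¬ (sy < ey ∨ (sy = ey ∧ sm ≤ em)) := by
      rintro (h | ⟨h, h'⟩) <;> rcases htup with h2 | ⟨h2, h3⟩ <;> omega
    have hA : pvLoopA ey em
        ((12 * ey + em + 1 - (12 * sy + sm)).toNat + (12 * ey + 13 - (12 * sy + sm)).toNat)
        sy sm [] = [] := by
      cases hn : (12 * ey + em + 1 - (12 * sy + sm)).toNat + (12 * ey + 13 - (12 * sy + sm)).toNat with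
      | zero => rw [pvLoopA]
      | succ n => rw [pvLoopA, if_neg hg]
    rw [hA]
    show ([] : List String) = List.foldl (fun acc idx => acc ++ [pvFmtIdx idx]) []
      (PySem.List.pyRange (sy * 12 + (sm - 1)) (ey * 12 + (em - 1) + 1) 1)
    rw [PySem.List.pyRange_one_eq_nil (by omega)]
    simp
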